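-- pv_equiv track=rewrite | github.com/rTiRe/alorithmics | 11.py | binary_search_insert_index
-- ===== SOURCE A (Python) =====
-- def binary_search_insert_index(arr, x):
--     low, high = 0, len(arr)
--     while low < high:
--         mid = (low + high) // 2
--         if arr[mid] < x:
--             low = mid + 1
--         else:
--             high = mid
--     return low
-- ===== SOURCE B (Python) =====
-- def binary_search_insert_index(arr, x):
--     if not arr:
--         return 0
--     m = len(arr) // 2
--     if arr[m] < x:
--         return m + 1 + binary_search_insert_index(arr[m + 1:], x)
--     return binary_search_insert_index(arr[:m], x)
-- ===== Notes on version B (the rewrite author's own statement) =====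
-- stated objective: alternative
-- what changed: Replaces the iterative low/high bound-shrinking loop with a recursive divide-and-conquer on list slices (recurse into the half before or after the midpoint, adding the offset), which probes the same midpoints and so agrees on every input.
import Mathlib
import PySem

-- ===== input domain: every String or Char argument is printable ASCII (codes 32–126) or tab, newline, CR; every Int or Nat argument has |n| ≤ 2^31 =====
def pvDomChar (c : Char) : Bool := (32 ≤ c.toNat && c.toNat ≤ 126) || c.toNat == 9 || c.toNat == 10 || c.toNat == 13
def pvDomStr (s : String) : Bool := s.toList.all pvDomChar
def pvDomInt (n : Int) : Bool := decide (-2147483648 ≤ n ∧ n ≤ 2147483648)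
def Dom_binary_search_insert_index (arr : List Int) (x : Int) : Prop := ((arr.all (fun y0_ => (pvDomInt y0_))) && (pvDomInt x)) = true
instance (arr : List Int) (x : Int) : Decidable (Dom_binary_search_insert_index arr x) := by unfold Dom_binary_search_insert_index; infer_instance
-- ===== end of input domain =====

-- B replaces A's iterative low/high binary-search loop by a recursive divide-and-conquer
-- on list slices that probes the same midpoints; same result on every input (objective: alternative).


-- ===== PORT A =====
-- A's while loop; low/high are always 0 ≤ low ≤ high ≤ len, so Nat with Nat `/` matches
-- Python's nonnegative `//`, and arr[mid] is always in range (getD's default is never read).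
def bsiLoop (arr : List Int) (x : Int) (low high : Nat) : Nat :=
  if low < high then
    if arr.getD ((low + high) / 2) 0 < x then
      bsiLoop arr x ((low + high) / 2 + 1) high
    else
      bsiLoop arr x low ((low + high) / 2)
  else low
termination_by high - low
decreasing_by all_goals omega

def binary_search_insert_index (arr : List Int) (x : Int) : Int :=
  (bsiLoop arr x 0 arr.length : Int)

-- ===== PORT B =====
def bsiRec (arr : List Int) (x : Int) : Nat :=
  if arr = [] then 0
  else
    let m := arr.length / 2
    if arr.getD m 0 < x then
      m + 1 + bsiRec (arr.drop (m + 1)) x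
    else
      bsiRec (arr.take m) x
termination_by arr.length
decreasing_by all_goals
  (have h1 := List.length_pos_of_ne_nil ‹arr ≠ []›
   simp [List.length_take, List.length_drop]; omega)

def binary_search_insert_index_alt (arr : List Int) (x : Int) : Int :=
  (bsiRec arr x : Int)

-- ===== PRECONDITION & SPEC =====
def Spec_binary_search_insert_index (arr : List Int) (x : Int) (out : Int) : Prop := out = binary_search_insert_index_alt arr x
instance (arr : List Int) (x : Int) (out : Int) : Decidable (Spec_binary_search_insert_index arr x out) := by unfold Spec_binary_search_insert_index; infer_instance

-- ===== CLAIM (what is proved, stated in full; the proofs are below) =====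
def Claim_equal_binary_search_insert_index : Prop := ∀ (arr : List Int) (x : Int), Dom_binary_search_insert_index arr x → Spec_binary_search_insert_index arr x (binary_search_insert_index arr x)

-- ===== LEMMAS AND PROOFS =====

-- The element A probes at absolute index low+m is the element B probes at index m of its slice.
theorem seg_getD (arr : List Int) (low high m : Nat)
    (hm : m < high - low) :
    ((arr.drop low).take (high - low)).getD m 0 = arr.getD (low + m) 0 := by
  simp [List.getD, hm, List.getElem?_drop]

-- Loop-vs-recursion bridge: A's loop on bounds (low, high) returns low plus B's
-- recursion on the slice arr[low:high].  Strong induction on high - low.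
theorem bsiLoop_eq_rec (arr : List Int) (x : Int) :
    ∀ (n low high : Nat), high - low = n → high ≤ arr.length →
      bsiLoop arr x low high = low + bsiRec ((arr.drop low).take (high - low)) x := by
  intro n
  induction n using Nat.strong_induction_on with
  | _ n ih =>
    intro low high hn hh
    rw [bsiLoop, bsiRec]
    by_cases hlt : low < high
    · have hlen : ((arr.drop low).take (high - low)).length = high - low := by
        simp [List.length_take, List.length_drop]; omega
      have hne : ¬ ((arr.drop low).take (high - low) = []) := by
        rw [← List.length_eq_zero_iff] at *; omega
      have hmid : (low + high) / 2 = low + (high - low) / 2 := by omega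
      have hmlt : (high - low) / 2 < high - low := by omega
      simp only [hlt, if_true, hne, if_false, hlen]
      rw [seg_getD arr low high ((high - low) / 2) hmlt, ← hmid]
      by_cases hb : arr.getD ((low + high) / 2) 0 < x
      · simp only [hb, if_true]
        rw [ih (high - ((low + high) / 2 + 1)) (by omega) ((low + high) / 2 + 1) high rfl hh]
        have hseg : ((arr.drop low).take (high - low)).drop ((high - low) / 2 + 1)
            = (arr.drop ((low + high) / 2 + 1)).take (high - ((low + high) / 2 + 1)) := by
          rw [List.drop_take, List.drop_drop]
          congr 1
          · omega
          · congr 1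
            omega
        rw [hseg]
        omega
      · simp only [hb, if_false]
        rw [ih ((low + high) / 2 - low) (by omega) low ((low + high) / 2) rfl (by omega)]
        congr 2
        rw [List.take_take]
        congr 1
        omega
    · have h0 : high - low = 0 := by omega
      simp [hlt, h0]

-- ===== VERDICT (by name: the statement is the Claim_ definition above) =====
theorem binary_search_insert_index_spec : Claim_equal_binary_search_insert_index := by
  intro arr x _
  unfold Spec_binary_search_insert_index binary_search_insert_index binary_search_insert_index_alt
  rw [bsiLoop_eq_rec arr x arr.length 0 arr.length rfl (le_refl _)]
  simp
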